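-- pv_equiv track=rewrite | github.com/xebia/coding-challenge-python | pascal_triangle.py | triangle_row
-- ===== SOURCE A (Python) =====
-- def triangle_row(n: int) -> list[int]:
--     if n == 0:
--         return [1]
--
--     previous_row = triangle_row(n - 1)
--     row = [1]
--     for col in range(1, n):
--         row.append(previous_row[col - 1] + previous_row[col] + 1)
--     row.append(1)
--
--     return row
-- ===== SOURCE B (Python) =====
-- def triangle_row(n: int) -> list[int]:
--     row = []
--     c = 1
--     for k in range(n + 1):
--         row.append(2 * c - 1)
--         c = c * (n - k) // (k + 1)
--     return row
-- ===== Notes on version B (the rewrite author's own statement) =====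
-- stated objective: faster
-- what changed: Replaces the recursive row-by-row Pascal construction with the closed form entry 2*C(n,k)-1, computing the binomials incrementally in a single pass.
import Mathlib
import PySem

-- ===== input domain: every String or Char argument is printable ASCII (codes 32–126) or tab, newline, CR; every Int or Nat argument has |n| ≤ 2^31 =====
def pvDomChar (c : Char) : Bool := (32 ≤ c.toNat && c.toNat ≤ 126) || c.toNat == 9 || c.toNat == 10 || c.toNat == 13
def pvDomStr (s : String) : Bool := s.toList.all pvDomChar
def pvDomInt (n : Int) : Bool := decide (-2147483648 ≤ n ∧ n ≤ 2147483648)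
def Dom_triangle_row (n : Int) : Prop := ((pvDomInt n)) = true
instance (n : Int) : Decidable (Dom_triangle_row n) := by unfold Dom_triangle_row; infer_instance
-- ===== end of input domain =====

-- B replaces A's recursive row-by-row Pascal construction with the closed form 2*C(n,k)-1,
-- computing the binomial coefficients incrementally in one pass (objective: faster).

-- ===== PORT A =====
-- A recurses on n-1; for n ≥ 0 that recursion is exactly structural recursion on n.toNat.
-- previous_row[col-1] / previous_row[col] are ported with pyGetD _ _ 0: the indices are
-- always in range here (col ∈ [1, m], previous row has length m+1), so this is exact.
def triangleRowA : Nat → List Int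
  | 0 => [1]
  | m + 1 =>
    let previous_row := triangleRowA m
    let row := (PySem.List.pyRange 1 ((m : Int) + 1)).foldl
      (fun r col =>
        r ++ [PySem.List.pyGetD previous_row (col - 1) 0 +
              PySem.List.pyGetD previous_row col 0 + 1]) [1]
    row ++ [1]

def triangle_row (n : Int) : List Int := triangleRowA n.toNat

-- ===== PORT B =====
def triangle_row_alt (n : Int) : List Int :=
  ((PySem.List.pyRange 0 (n + 1)).foldl
    (fun (st : List Int × Int) k =>
      (st.1 ++ [2 * st.2 - 1], PySem.Int.floordiv (st.2 * (n - k)) (k + 1)))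
    ([], 1)).1

-- ===== PRECONDITION & SPEC =====
-- Pre_ excludes n < 0, on which A recurses forever (RecursionError); B returns [] there.
def Pre_triangle_row (n : Int) : Prop := 0 ≤ n
instance (n : Int) : Decidable (Pre_triangle_row n) := by unfold Pre_triangle_row; infer_instance
def pvWitness_triangle_row : Int := (4)

def Spec_triangle_row (n : Int) (out : List Int) : Prop := out = triangle_row_alt n
instance (n : Int) (out : List Int) : Decidable (Spec_triangle_row n out) := by unfold Spec_triangle_row; infer_instance

-- ===== CLAIM (what is proved, stated in full; the proofs are below) =====
def Claim_equal_triangle_row : Prop := ∀ (n : Int), Dom_triangle_row n → Pre_triangle_row n → Spec_triangle_row n (triangle_row n)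

-- ===== LEMMAS AND PROOFS =====

-- the common target: entry k of row m is 2*C(m,k)-1
def pvTarget (m : Nat) : List Int :=
  (List.range (m + 1)).map (fun k => 2 * ((m.choose k : Nat) : Int) - 1)

lemma triangleRowA_eq (m : Nat) : triangleRowA m = pvTarget m := by
  induction m with
  | zero => simp [triangleRowA, pvTarget]
  | succ m ih =>
    have hrange : PySem.List.pyRange 1 ((m : Int) + 1)
        = (List.range m).map (fun k => (1 : Int) + (k : Nat)) := by
      have h : ((m : Int) + 1 - 1).toNat = m := by omega
      rw [PySem.List.pyRange_one, h]
    simp only [triangleRowA, ih, PySem.List.foldl_append_singleton_eq_map, hrange,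
      List.map_map]
    have hget : ∀ k : Nat, k ≤ m →
        PySem.List.pyGetD (pvTarget m) ((k : Nat) : Int) 0
          = 2 * ((m.choose k : Nat) : Int) - 1 := by
      intro k hk
      rw [PySem.List.pyGetD_natCast]
      simp [pvTarget, List.getD, Nat.lt_succ_of_le hk]
    have hmap : ∀ k ∈ List.range m,
        ((fun col => PySem.List.pyGetD (pvTarget m) (col - 1) 0 +
              PySem.List.pyGetD (pvTarget m) col 0 + 1) ∘ fun k : Nat => (1 : Int) + (k : Nat)) k
          = 2 * (((m + 1).choose (k + 1) : Nat) : Int) - 1 := by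
      intro k hk
      have hk' : k < m := List.mem_range.mp hk
      have h1 : (1 : Int) + (k : Nat) - 1 = ((k : Nat) : Int) := by omega
      have h2 : (1 : Int) + (k : Nat) = (((k + 1 : Nat) : Nat) : Int) := by push_cast; omega
      simp only [Function.comp, h1]
      rw [h2, hget k (Nat.le_of_lt hk'), hget (k + 1) hk']
      have hch : (m + 1).choose (k + 1) = m.choose k + m.choose (k + 1) :=
        Nat.choose_succ_succ m k
      rw [hch]
      push_cast
      ring
    rw [List.map_congr_left hmap]
    -- assemble pvTarget (m+1) = [1] ++ middle ++ [1]
    have : pvTarget (m + 1)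
        = [1] ++ (List.range m).map (fun k => 2 * (((m + 1).choose (k + 1) : Nat) : Int) - 1) ++ [1] := by
      simp only [pvTarget]
      rw [show m + 1 + 1 = (m + 1) + 1 from rfl, List.range_succ, List.map_append]
      rw [List.range_succ_eq_map, List.map_cons, List.map_map]
      simp [Nat.choose_self, Function.comp_def]
    rw [this]
lemma altLoop (m : Nat) : ∀ (d j : Nat), j + d = m + 1 →
    ((PySem.List.pyRange (j : Int) ((m : Int) + 1)).foldl
      (fun (st : List Int × Int) k =>
        (st.1 ++ [2 * st.2 - 1], PySem.Int.floordiv (st.2 * ((m : Int) - k)) (k + 1)))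
      ((List.range j).map (fun k => 2 * ((m.choose k : Nat) : Int) - 1), ((m.choose j : Nat) : Int))).1
    = pvTarget m := by
  intro d
  induction d with
  | zero =>
    intro j hj
    have hj' : j = m + 1 := by omega
    subst hj'
    rw [PySem.List.pyRange_one_eq_nil (by push_cast; omega)]
    simp [pvTarget]
  | succ d ih =>
    intro j hj
    have hjm : j ≤ m := by omega
    rw [PySem.List.pyRange_one_cons (by omega)]
    simp only [List.foldl_cons]
    have hsub : (m : Int) - (j : Nat) = ((m - j : Nat) : Nat) := by omega
    have hdiv : PySem.Int.floordiv (((m.choose j : Nat) : Int) * ((m : Int) - (j : Nat))) ((j : Nat) + 1)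
        = ((m.choose (j + 1) : Nat) : Int) := by
      rw [hsub]
      have h1 : ((m.choose j : Nat) : Int) * ((m - j : Nat) : Int) = ((m.choose j * (m - j) : Nat) : Int) := by
        push_cast
        ring
      have h2 : ((j : Nat) : Int) + 1 = ((j + 1 : Nat) : Int) := by push_cast; ring
      rw [h1, h2, PySem.Int.floordiv_natCast]
      congr 1
      rw [← Nat.choose_succ_right_eq, Nat.mul_div_cancel _ (Nat.succ_pos j)]
    have happ : (List.range j).map (fun k => 2 * ((m.choose k : Nat) : Int) - 1)
          ++ [2 * ((m.choose j : Nat) : Int) - 1]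
        = (List.range (j + 1)).map (fun k => 2 * ((m.choose k : Nat) : Int) - 1) := by
      rw [List.range_succ, List.map_append]; rfl
    have hcast : ((j : Nat) : Int) + 1 = (((j + 1 : Nat) : Nat) : Int) := by push_cast; ring
    rw [hdiv, happ, hcast]
    exact ih (j + 1) (by omega)

lemma alt_eq (m : Nat) : triangle_row_alt (m : Int) = pvTarget m := by
  have := altLoop m (m + 1) 0 (by omega)
  simpa [triangle_row_alt] using this

-- ===== VERDICT (by name: the statement is the Claim_ definition above) =====
theorem triangle_row_spec : Claim_equal_triangle_row := by
  intro n _ hpre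
  unfold Spec_triangle_row triangle_row
  have hn : ((n.toNat : Nat) : Int) = n := Int.toNat_of_nonneg hpre
  rw [triangleRowA_eq, ← alt_eq n.toNat, hn]
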